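-- pv_equiv track=rewrite | github.com/wilsonhsu76/python_study | ch1/q1_4_Palindrome_permutation.py | check_palindrome_permutation
-- ===== SOURCE A (Python) =====
-- def check_palindrome_permutation(str_t):
--     char_table = [0 for x in range(ord('z') - ord('a') + 1)]
--     odd_count = 0 #How many values are odd in table
--
--     for char_c in str_t:
--         index = mapping_func(char_c)
--         if index != -1:
--             char_table[index] += 1
--             if (char_table[index] % 2):
--                 odd_count += 1
--             else:
--                 odd_count -= 1
--     return odd_count <= 1
--
-- def mapping_func(c):
--     value = ord(c)
--     value_a = ord('a')
--     value_z = ord('z')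
--     value_A = ord('A')
--     value_Z = ord('Z')
--
--     if value_a <= value <= value_z:
--         return value - value_a
--     elif value_A <= value <= value_Z:
--         return value - value_A
--     else:
--         return -1
-- ===== SOURCE B (Python) =====
-- def check_palindrome_permutation(str_t):
--     letters = [c for c in str_t.lower() if 'a' <= c <= 'z']
--     return sum(letters.count(c) % 2 for c in set(letters)) <= 1
-- ===== Notes on version B (the rewrite author's own statement) =====
-- stated objective: alternative
-- what changed: Instead of one pass maintaining a 26-slot count table with an incrementally adjusted odd counter, B first extracts the lowercased letters as a list, then for each distinct letter counts its occurrences with list.count and sums the parities, returning sum <= 1 (staged passes over a materialised letter list, no per-character state update).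
import Mathlib
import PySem

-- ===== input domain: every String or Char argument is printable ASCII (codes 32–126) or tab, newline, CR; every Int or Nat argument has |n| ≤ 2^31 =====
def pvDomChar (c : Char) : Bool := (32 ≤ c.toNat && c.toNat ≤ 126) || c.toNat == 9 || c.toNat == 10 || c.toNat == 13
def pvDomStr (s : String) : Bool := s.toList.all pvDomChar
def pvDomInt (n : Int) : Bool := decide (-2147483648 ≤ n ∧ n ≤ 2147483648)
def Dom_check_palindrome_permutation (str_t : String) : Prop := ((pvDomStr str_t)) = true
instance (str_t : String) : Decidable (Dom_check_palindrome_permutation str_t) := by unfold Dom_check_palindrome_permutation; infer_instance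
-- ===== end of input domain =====

-- B replaces A's single pass (26-slot count table + incrementally adjusted odd counter) by
-- staged passes: extract the lowercased letters, then count each distinct letter and sum the
-- parities (alternative decomposition, same results); return values only.

-- ===== PORT A =====
def mapping_func (c : Char) : Int :=
  let value : Int := (c.toNat : Int)
  if 97 ≤ value ∧ value ≤ 122 then value - 97        -- ord('a')..ord('z')
  else if 65 ≤ value ∧ value ≤ 90 then value - 65    -- ord('A')..ord('Z')
  else -1

-- loop body of A: state = (char_table, odd_count); indices are always in [0,25] so
-- pySetD/pyGetD are exact for python's char_table[index]
def pvStepA (st : List Int × Int) (char_c : Char) : List Int × Int :=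
  let index := mapping_func char_c
  if index ≠ -1 then
    let table := PySem.List.pySetD st.1 index (PySem.List.pyGetD st.1 index 0 + 1)
    if PySem.Int.mod (PySem.List.pyGetD table index 0) 2 ≠ 0 then (table, st.2 + 1)
    else (table, st.2 - 1)
  else st

def check_palindrome_permutation (str_t : String) : Bool :=
  -- char_table = [0 for x in range(ord('z') - ord('a') + 1)]
  let char_table : List Int := (PySem.List.pyRange 0 26 1).map (fun _ => (0 : Int))
  let res := str_t.toList.foldl pvStepA (char_table, 0)
  decide (res.2 ≤ 1)

-- ===== PORT B =====
def check_palindrome_permutation_alt (str_t : String) : Bool :=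
  -- letters = [c for c in str_t.lower() if 'a' <= c <= 'z']
  let letters := (PySem.Str.lower str_t).toList.filter (fun c => decide ('a' ≤ c ∧ c ≤ 'z'))
  -- sum(letters.count(c) % 2 for c in set(letters))
  let odd : Int := (PySem.Set.ofList letters).foldl
    (fun a c => a + PySem.Int.mod ((letters.count c : Int)) 2) 0
  decide (odd ≤ 1)

-- ===== PRECONDITION & SPEC =====
def Spec_check_palindrome_permutation (str_t : String) (out : Bool) : Prop := out = check_palindrome_permutation_alt str_t
instance (str_t : String) (out : Bool) : Decidable (Spec_check_palindrome_permutation str_t out) := by unfold Spec_check_palindrome_permutation; infer_instance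

-- ===== CLAIM (what is proved, stated in full; the proofs are below) =====
def Claim_equal_check_palindrome_permutation : Prop := ∀ (str_t : String), Dom_check_palindrome_permutation str_t → Spec_check_palindrome_permutation str_t (check_palindrome_permutation str_t)

-- ===== LEMMAS AND PROOFS =====

-- the lowercased letters of cs (B's 'letters' list, over List Char)
def pvLetters (cs : List Char) : List Char :=
  (cs.map PySem.Chars.lowerChar).filter (fun c => decide ('a' ≤ c ∧ c ≤ 'z'))

-- table index of a lowercase letter
def pvIdx (c : Char) : Int := (c.toNat : Int) - 97

-- number of distinct letters occurring an odd number of times in p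
def pvN (p : List Char) : Int :=
  ((PySem.Set.ofList p).countP (fun c => decide (p.count c % 2 = 1)) : Int)

-- invariant of A's loop, read along the lowered-letter prefix p
def pvInv (t : List Int) (oc : Int) (p : List Char) : Prop :=
  t.length = 26 ∧
  (∀ c : Char, 97 ≤ c.toNat → c.toNat ≤ 122 →
     PySem.List.pyGetD t (pvIdx c) 0 = (p.count c : Int)) ∧
  oc = pvN p

lemma pvChar_le_iff (a b : Char) : a ≤ b ↔ a.toNat ≤ b.toNat := by
  rw [Char.le_def, UInt32.le_iff_toNat_le, Char.toNat, Char.toNat]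

lemma pvChar_eq_of_toNat (a b : Char) (h : a.toNat = b.toNat) : a = b := by
  apply Char.ext; exact UInt32.toNat_inj.mp h

-- lowerChar on a non-uppercase char is the identity
lemma pvLower_of_not_upper (c : Char) (h : ¬ (65 ≤ c.toNat ∧ c.toNat ≤ 90)) :
    PySem.Chars.lowerChar c = c := by
  have hup : PySem.Chars.isupper c = false := by
    unfold PySem.Chars.isupper
    simp only [Bool.and_eq_false_iff, decide_eq_false_iff_not]
    by_cases hA1 : 'A' ≤ c
    · refine Or.inr (fun h2 => ?_)
      rw [pvChar_le_iff] at hA1 h2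
      exact h ⟨hA1, h2⟩
    · exact Or.inl hA1
  simp [PySem.Chars.lowerChar, hup]

lemma pvLower_of_upper (c : Char) (h : 65 ≤ c.toNat ∧ c.toNat ≤ 90) :
    PySem.Chars.lowerChar c = Char.ofNat (c.toNat + 32) := by
  have hup : PySem.Chars.isupper c = true := by
    unfold PySem.Chars.isupper
    simp only [Bool.and_eq_true, decide_eq_true_eq]
    refine ⟨?_, ?_⟩ <;> rw [pvChar_le_iff]
    · exact h.1
    · exact h.2
  simp [PySem.Chars.lowerChar, hup]

lemma pvCount_append (p : List Char) (l c : Char) :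
    (p ++ [l]).count c = p.count c + (if c = l then 1 else 0) := by
  rw [List.count_append]
  by_cases hc : c = l
  · subst hc; simp
  · rw [if_neg hc, List.count_singleton]
    simp
    exact fun h => hc h.symm

-- countP under a pointwise-equal predicate (Bool form)
lemma pvCountP_congr (d : List Char) (f g : Char → Bool) (h : ∀ a ∈ d, g a = f a) :
    d.countP g = d.countP f :=
  List.countP_congr (fun a ha => by rw [h a ha])

-- one flip of countP on a nodup list at a member element
lemma pvCountP_flip (l : Char) (f g : Char → Bool) (d : List Char) (hd : d.Nodup)
    (hl : l ∈ d) (hfg : ∀ c ∈ d, c ≠ l → g c = f c) (hgl : g l = !f l) :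
    (d.countP g : Int) = (d.countP f : Int) + (if g l then 1 else -1) := by
  induction d with
  | nil => cases hl
  | cons a d ih =>
    rcases List.mem_cons.mp hl with heq | hmem
    · subst heq
      have hnd : l ∉ d := (List.nodup_cons.mp hd).1
      have hcong : d.countP g = d.countP f :=
        pvCountP_congr d f g (fun c hc => hfg c (List.mem_cons_of_mem l hc)
          (fun he => hnd (he ▸ hc)))
      simp only [List.countP_cons, hcong, hgl]
      cases hf : f l <;> simp
    · have hne : a ≠ l := fun he => (List.nodup_cons.mp hd).1 (he ▸ hmem)
      have hga : g a = f a := hfg a (List.mem_cons_self) hne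
      have := ih (List.nodup_cons.mp hd).2 hmem
        (fun c hc => hfg c (List.mem_cons_of_mem a hc))
      simp only [List.countP_cons, hga]
      push_cast at this ⊢
      omega

-- how pvN changes when one lowercase letter is appended
lemma pvN_append (p : List Char) (l : Char) :
    pvN (p ++ [l]) = pvN p + (if (p.count l + 1) % 2 = 1 then 1 else -1) := by
  have hcount : ∀ c, (p ++ [l]).count c = p.count c + (if c = l then 1 else 0) := by
    intro c
    exact pvCount_append p l c
  unfold pvN
  rw [PySem.Set.ofList_append_singleton]
  set f : Char → Bool := fun c => decide (p.count c % 2 = 1) with hf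
  set g : Char → Bool := fun c => decide ((p ++ [l]).count c % 2 = 1) with hg
  have hoff : ∀ c, c ≠ l → g c = f c := by
    intro c hc; simp only [hg, hf, hcount c, if_neg hc, Nat.add_zero]
  have hgl : g l = decide ((p.count l + 1) % 2 = 1) := by
    simp only [hg, hcount l]
    simp
  by_cases hmem : l ∈ p
  · have hld : l ∈ PySem.Set.ofList p := (PySem.Set.mem_ofList p l).mpr hmem
    rw [PySem.Set.add_of_mem hld]
    have hglf : g l = !f l := by
      rw [hgl]; simp only [hf]
      rcases Nat.mod_two_eq_zero_or_one (p.count l) with h | h <;> simp [h, Nat.add_mod]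
    have := pvCountP_flip l f g (PySem.Set.ofList p) (PySem.Set.nodup_ofList p) hld
      (fun c _ hc => hoff c hc) hglf
    rw [this, hgl]
    by_cases hp : (p.count l + 1) % 2 = 1 <;> simp [hp]
  · have hld : l ∉ PySem.Set.ofList p := fun h => hmem ((PySem.Set.mem_ofList p l).mp h)
    rw [PySem.Set.add_of_not_mem hld]
    have hcz : p.count l = 0 := List.count_eq_zero.mpr hmem
    have hgl1 : g l = true := by rw [hgl, hcz]; simp
    have hcong : (PySem.Set.ofList p).countP g = (PySem.Set.ofList p).countP f :=
      pvCountP_congr _ f g (fun c hc => hoff c (fun he => hld (he ▸ hc)))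
    rw [List.countP_append, hcong]
    simp [hgl1, hcz]

-- A's loop step on a lowercase letter preserves the invariant
lemma pvStep_inv (t : List Int) (oc : Int) (p : List Char) (l : Char)
    (hl : 97 ≤ l.toNat ∧ l.toNat ≤ 122) (hinv : pvInv t oc p) :
    pvInv (pvStepA (t, oc) l).1 (pvStepA (t, oc) l).2 (p ++ [l]) := by
  obtain ⟨hlen, htab, hoc⟩ := hinv
  have hmap : mapping_func l = ((l.toNat - 97 : Nat) : Int) := by
    unfold mapping_func
    rw [if_pos (by constructor <;> omega)]
    omega
  set i : Nat := l.toNat - 97 with hi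
  have hil : pvIdx l = (i : Int) := by simp [pvIdx, hi]; omega
  have hilen : i < t.length := by omega
  have hne : ((i : Int) ≠ -1) := by omega
  have hgetset : ∀ (m : Nat) (v : Int),
      PySem.List.pyGetD (PySem.List.pySetD t (i : Int) v) (m : Int) 0
        = if m = i then v else PySem.List.pyGetD t (m : Int) 0 :=
    fun m v => PySem.List.pyGetD_pySetD_natCast t i m v 0 hilen
  have hold : PySem.List.pyGetD t (i : Int) 0 = (p.count l : Int) := by
    rw [← hil]; exact htab l hl.1 hl.2
  have hcount : ∀ c, (p ++ [l]).count c = p.count c + (if c = l then 1 else 0) := by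
    intro c
    exact pvCount_append p l c
  have hnew : PySem.List.pyGetD (PySem.List.pySetD t (i : Int) ((p.count l : Int) + 1)) (i : Int) 0
      = (p.count l : Int) + 1 := by rw [hgetset i _, if_pos rfl]
  have hbranch : (PySem.Int.mod ((p.count l : Int) + 1) 2 ≠ 0) ↔ ((p.count l + 1) % 2 = 1) := by
    rw [PySem.Int.mod_eq_emod_of_pos (by omega)]
    omega
  have hsplit : pvStepA (t, oc) l
      = (PySem.List.pySetD t (i : Int) ((p.count l : Int) + 1),
         if (p.count l + 1) % 2 = 1 then oc + 1 else oc - 1) := by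
    simp only [pvStepA, hmap]
    rw [if_pos hne, hold, hnew]
    by_cases hb : (p.count l + 1) % 2 = 1
    · rw [if_pos (hbranch.mpr hb), if_pos hb]
    · rw [if_neg (fun h => hb (hbranch.mp h)), if_neg hb]
  rw [hsplit]
  refine ⟨?_, ?_, ?_⟩
  · -- table length preserved
    simpa [PySem.List.length_pySetD] using hlen
  · -- table entries = counts
    intro c h97 h122
    have hrep : pvIdx c = ((c.toNat - 97 : Nat) : Int) := by simp [pvIdx]; omega
    show PySem.List.pyGetD (PySem.List.pySetD t (i : Int) ((p.count l : Int) + 1)) (pvIdx c) 0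
        = ((p ++ [l]).count c : Int)
    rw [hrep, hgetset (c.toNat - 97) _, hcount c]
    by_cases hc : c = l
    · subst hc
      rw [if_pos (by omega), if_pos rfl]
      push_cast; ring
    · have hnei : c.toNat - 97 ≠ i := by
        intro hcontra
        exact hc (pvChar_eq_of_toNat c l (by omega))
      rw [if_neg hnei, if_neg hc, ← hrep, htab c h97 h122]
      push_cast; ring
  · -- odd counter = pvN
    show (if (p.count l + 1) % 2 = 1 then oc + 1 else oc - 1) = pvN (p ++ [l])
    rw [pvN_append p l, ← hoc]
    by_cases hb : (p.count l + 1) % 2 = 1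
    · rw [if_pos hb, if_pos hb]
    · rw [if_neg hb, if_neg hb]
      ring

-- A's fold over the raw characters equals its fold over the lowered-letter list
lemma pvTransport (cs : List Char) (st : List Int × Int)
    (hdom : ∀ c ∈ cs, pvDomChar c = true) :
    cs.foldl pvStepA st = (pvLetters cs).foldl pvStepA st := by
  induction cs generalizing st with
  | nil => rfl
  | cons c cs ih =>
    have hdc := hdom c List.mem_cons_self
    have hbound : c.toNat ≤ 126 := by
      simp only [pvDomChar, Bool.or_eq_true, Bool.and_eq_true, decide_eq_true_eq,
        beq_iff_eq] at hdc
      omega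
    have htail : ∀ x ∈ cs, pvDomChar x = true :=
      fun x hx => hdom x (List.mem_cons_of_mem c hx)
    simp only [pvLetters, List.map_cons, List.filter_cons] at *
    by_cases h1 : 97 ≤ c.toNat ∧ c.toNat ≤ 122
    · -- lowercase letter: kept, lowerChar c = c
      have hlc : PySem.Chars.lowerChar c = c := pvLower_of_not_upper c (by omega)
      have hkeep : ('a' ≤ c ∧ c ≤ 'z') := by
        refine ⟨?_, ?_⟩ <;> rw [pvChar_le_iff]
        · exact h1.1
        · exact h1.2
      rw [hlc, if_pos (by simpa using hkeep)]
      simp only [List.foldl_cons]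
      exact ih (pvStepA st c) htail
    · by_cases h2 : 65 ≤ c.toNat ∧ c.toNat ≤ 90
      · -- uppercase letter: kept as its lowercase form, same mapping_func value
        set l := Char.ofNat (c.toNat + 32) with hldef
        have hlc : PySem.Chars.lowerChar c = l := pvLower_of_upper c h2
        have hvalid : (c.toNat + 32).isValidChar := Or.inl (by omega)
        have htn : l.toNat = c.toNat + 32 := by
          rw [hldef, Char.toNat_ofNat, if_pos hvalid]
        have hkeep : ('a' ≤ l ∧ l ≤ 'z') := by
          constructor
          · rw [pvChar_le_iff]; show 97 ≤ l.toNat; omega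
          · rw [pvChar_le_iff]; show l.toNat ≤ 122; omega
        have hmapeq : mapping_func c = mapping_func l := by
          unfold mapping_func
          rw [if_neg (by rintro ⟨ha, hb⟩; omega), if_pos (by constructor <;> omega),
            if_pos (by rw [htn]; constructor <;> omega)]
          rw [htn]; push_cast; ring
        have hstep : pvStepA st c = pvStepA st l := by
          simp only [pvStepA, hmapeq]
        rw [hlc, if_pos (by simpa using hkeep)]
        simp only [List.foldl_cons, hstep]
        exact ih (pvStepA st l) htail
      · -- non-letter: dropped, pvStepA skips
        have hlc : PySem.Chars.lowerChar c = c := pvLower_of_not_upper c h2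
        have hdrop : ¬ ('a' ≤ c ∧ c ≤ 'z') := by
          rintro ⟨ha, hb⟩
          rw [pvChar_le_iff] at ha hb
          exact h1 ⟨ha, hb⟩
        have hmap : mapping_func c = -1 := by
          unfold mapping_func
          rw [if_neg (by rintro ⟨ha, hb⟩; omega), if_neg (by rintro ⟨ha, hb⟩; omega)]
        have hskip : pvStepA st c = st := by
          simp [pvStepA, hmap]
        rw [hlc, if_neg (by simpa using hdrop)]
        simp only [List.foldl_cons, hskip]
        exact ih st htail

-- every element of pvLetters is a lowercase letter
lemma pvLetters_mem (cs : List Char) (c : Char) (hc : c ∈ pvLetters cs) :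
    97 ≤ c.toNat ∧ c.toNat ≤ 122 := by
  unfold pvLetters at hc
  have := (List.mem_filter.mp hc).2
  simp only [decide_eq_true_eq] at this
  obtain ⟨h1, h2⟩ := this
  rw [pvChar_le_iff] at h1 h2
  exact ⟨h1, h2⟩

lemma pvFold_inv (q : List Char) (t : List Int) (oc : Int) (p : List Char)
    (hq : ∀ c ∈ q, 97 ≤ c.toNat ∧ c.toNat ≤ 122) (hinv : pvInv t oc p) :
    pvInv (q.foldl pvStepA (t, oc)).1 (q.foldl pvStepA (t, oc)).2 (p ++ q) := by
  induction q generalizing t oc p with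
  | nil => simpa using hinv
  | cons l q ih =>
    simp only [List.foldl_cons]
    have hstep := pvStep_inv t oc p l (hq l List.mem_cons_self) hinv
    have heta : pvStepA (t, oc) l = ((pvStepA (t, oc) l).1, (pvStepA (t, oc) l).2) := rfl
    rw [heta]
    have := ih (pvStepA (t, oc) l).1 (pvStepA (t, oc) l).2 (p ++ [l])
      (fun c hc => hq c (List.mem_cons_of_mem l hc)) hstep
    simpa [List.append_assoc] using this

lemma pvInv_init : pvInv ((PySem.List.pyRange 0 26 1).map (fun _ => (0 : Int))) 0 [] := by
  refine ⟨by decide, ?_, by simp [pvN]⟩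
  intro c h97 h122
  have hz : ∀ j, j < 26 → ((PySem.List.pyRange 0 26 1).map (fun _ => (0 : Int))).getD j 0 = 0 := by decide
  have hrep : pvIdx c = ((c.toNat - 97 : Nat) : Int) := by simp [pvIdx]; omega
  rw [hrep, PySem.List.pyGetD_natCast, hz (c.toNat - 97) (by omega)]
  simp

-- B's sum of parities over any list equals the countP of odd letters
lemma pvSum_eq_countP (L d : List Char) (a : Int) :
    d.foldl (fun a c => a + PySem.Int.mod ((L.count c : Int)) 2) a
      = a + (d.countP (fun c => decide (L.count c % 2 = 1)) : Int) := by
  induction d generalizing a with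
  | nil => simp
  | cons c d ih =>
    have hmod : PySem.Int.mod ((L.count c : Int)) 2 = ((L.count c % 2 : Nat) : Int) := by
      rw [PySem.Int.mod_eq_emod_of_pos (by omega)]
      omega
    rw [List.foldl_cons, hmod, ih, List.countP_cons]
    rcases Nat.mod_two_eq_zero_or_one (L.count c) with h | h <;> rw [h]
    · simp
    · simp
      omega

-- ===== VERDICT (by name: the statement is the Claim_ definition above) =====
theorem check_palindrome_permutation_spec : Claim_equal_check_palindrome_permutation := by
  intro str_t hdom
  unfold Spec_check_palindrome_permutation check_palindrome_permutation check_palindrome_permutation_alt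
  have hdom' : ∀ c ∈ str_t.toList, pvDomChar c = true := by
    intro c hc
    exact List.all_eq_true.mp hdom c hc
  have hlet : (PySem.Str.lower str_t).toList.filter (fun c => decide ('a' ≤ c ∧ c ≤ 'z'))
      = pvLetters str_t.toList := by
    rw [PySem.Str.toList_lower]
    rfl
  simp only [hlet, pvTransport str_t.toList _ hdom']
  have hinv := pvFold_inv (pvLetters str_t.toList) _ 0 []
    (fun c hc => pvLetters_mem str_t.toList c hc) pvInv_init
  simp only [List.nil_append] at hinv
  rw [hinv.2.2, pvSum_eq_countP (pvLetters str_t.toList) (PySem.Set.ofList (pvLetters str_t.toList)) 0]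
  simp [pvN]
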